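-- pv_equiv track=rewrite | github.com/sipa/ezbase32 | bech32.py | bech32_decode
-- ===== SOURCE A (Python) =====
-- def bech32_polymod(values):
--   GEN = [0x3b6a57b2, 0x26508e6d, 0x1ea119fa, 0x3d4233dd, 0x2a1462b3]
--   chk = 1
--   for v in values:
--     b = (chk >> 25)
--     chk = (chk & 0x1ffffff) << 5 ^ v
--     for i in range(5):
--       chk ^= GEN[i] if ((b >> i) & 1) else 0
--   return chk
--
-- def bech32_hrp_expand(s):
--   return [ord(x) >> 5 for x in s] + [0] + [ord(x) & 31 for x in s] + [0]
--
-- def bech32_verify_checksum(hrp, data):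
--   return bech32_polymod(bech32_hrp_expand(hrp) + data) == 1
--
-- ZBASE32="ybndrfg8ejkmcpqxot1uwisza345h769"
--
-- def bech32_decode(s):
--   if any (ord(x) < 31 or ord(x) > 127 for x in s):
--     return (None, None)
--   pos = s.rfind('-')
--   if pos < 1 or pos + 7 > len(s) or len(s) > 89:
--     return (None, None)
--   if not all(x in ZBASE32 for x in s[pos+1:]):
--     return (None, None)
--   hrp = s[:pos]
--   data = [ZBASE32.find(x) for x in s[pos+1:]]
--   if not bech32_verify_checksum(hrp, data):
--     return (None, None)
--   return (hrp, data[:-6])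
-- ===== SOURCE B (Python) =====
-- # B: table-driven polymod (32-entry XOR table built by doubling) and a one-pass
-- # char->value dict decode of the data part, replacing the per-bit inner loop and
-- # the separate membership-check + find passes.
--
-- GEN = [0x3b6a57b2, 0x26508e6d, 0x1ea119fa, 0x3d4233dd, 0x2a1462b3]
--
-- def _make_table():
--   # table[b] = XOR of GEN[i] over the bits i set in b, built by doubling
--   table = [0]
--   for g in GEN:
--     table += [t ^ g for t in table]
--   return table
--
-- GEN_TABLE = _make_table()
--
-- def bech32_polymod(values):
--   chk = 1
--   for v in values:
--     chk = ((chk & 0x1ffffff) << 5 ^ v) ^ GEN_TABLE[chk >> 25]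
--   return chk
--
-- def bech32_hrp_expand(s):
--   return [ord(x) >> 5 for x in s] + [0] + [ord(x) & 31 for x in s] + [0]
--
-- ZBASE32 = "ybndrfg8ejkmcpqxot1uwisza345h769"
-- _ZMAP = {c: i for i, c in enumerate(ZBASE32)}
--
-- def bech32_decode(s):
--   if any(ord(x) < 31 or ord(x) > 127 for x in s):
--     return (None, None)
--   pos = s.rfind('-')
--   if pos < 1 or pos + 7 > len(s) or len(s) > 89:
--     return (None, None)
--   data = []
--   for x in s[pos+1:]:
--     v = _ZMAP.get(x)
--     if v is None:
--       return (None, None)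
--     data.append(v)
--   hrp = s[:pos]
--   if bech32_polymod(bech32_hrp_expand(hrp) + data) != 1:
--     return (None, None)
--   return (hrp, data[:-6])
-- ===== Notes on version B (the rewrite author's own statement) =====
-- stated objective: alternative
-- what changed: bech32_polymod's per-value 5-iteration bit loop is replaced by a single lookup in a 32-entry XOR table precomputed by doubling from GEN, and the data part is decoded in one pass through a precomputed char->value dict (with early exit on an invalid char) instead of a membership-check pass followed by a ZBASE32.find pass.
import Mathlib
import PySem

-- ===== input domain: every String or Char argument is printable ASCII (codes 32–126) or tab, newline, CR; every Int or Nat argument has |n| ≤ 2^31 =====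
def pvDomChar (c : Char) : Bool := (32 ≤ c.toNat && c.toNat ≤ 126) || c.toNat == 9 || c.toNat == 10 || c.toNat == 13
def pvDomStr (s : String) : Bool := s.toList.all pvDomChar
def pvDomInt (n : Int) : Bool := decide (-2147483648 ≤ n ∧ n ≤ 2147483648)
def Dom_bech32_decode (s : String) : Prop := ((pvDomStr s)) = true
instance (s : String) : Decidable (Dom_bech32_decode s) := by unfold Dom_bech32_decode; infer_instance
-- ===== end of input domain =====

-- B rewrites the polymod inner bit-loop as one lookup in a precomputed 32-entry XOR table and
-- decodes the data part in a single dict-driven pass; same return value everywhere (objective: alternative).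

-- ===== PORT A =====
def pvGEN : List Int := [0x3b6a57b2, 0x26508e6d, 0x1ea119fa, 0x3d4233dd, 0x2a1462b3]

-- the ZBASE32 string constant, as its list of characters
def pvZB : List Char := ['y','b','n','d','r','f','g','8','e','j','k','m','c','p','q','x','o','t','1','u','w','i','s','z','a','3','4','5','h','7','6','9']

-- one iteration of A's 'for v in values' body (b = chk >> 25; 5-step inner bit loop)
-- GEN[i] is ported as pyGetD (i is always 0..4, in range); i.toNat is exact since i ∈ range(5) is nonnegative
def pvStepA (chk v : Int) : Int :=
  let b := chk >>> (25 : Nat)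
  let chk2 := PySem.Int.bxor ((PySem.Int.band chk 0x1ffffff) <<< (5 : Nat)) v
  (PySem.List.pyRange 0 5 1).foldl
    (fun c i => PySem.Int.bxor c
      (if PySem.Int.band (b >>> i.toNat) 1 ≠ 0 then PySem.List.pyGetD pvGEN i 0 else 0)) chk2

def bech32_polymod (values : List Int) : Int := values.foldl pvStepA 1

def bech32_hrp_expand (cs : List Char) : List Int :=
  cs.map (fun x => ((x.toNat : Int)) >>> (5 : Nat)) ++ [0]
    ++ cs.map (fun x => PySem.Int.band (x.toNat : Int) 31) ++ [0]

def bech32_verify_checksum (hrp : List Char) (data : List Int) : Bool :=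
  bech32_polymod (bech32_hrp_expand hrp ++ data) == 1

def bech32_decode (s : String) : Option String × Option (List Int) :=
  let cs := s.toList
  if cs.any (fun x => decide (x.toNat < 31) || decide (127 < x.toNat)) then (none, none)
  else
    let pos := PySem.Str.rfind s "-"
    if pos < 1 ∨ pos + 7 > ((PySem.Str.len s : Int)) ∨ ((PySem.Str.len s : Int)) > 89 then (none, none)
    else
      let tl := PySem.List.slice cs (some (pos + 1)) none
      if ¬ (tl.all (fun x => PySem.Chars.isIn [x] pvZB)) then (none, none)
      else
        let hrp := PySem.List.slice cs none (some pos)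
        let data := tl.map (fun x => PySem.Chars.find pvZB [x])
        if ¬ (bech32_verify_checksum hrp data) then (none, none)
        else (some (String.ofList hrp), some (PySem.List.slice data none (some (-6))))

-- ===== PORT B =====
-- GEN_TABLE = _make_table(): the doubling loop 'table += [t ^ g for t in table]'
def pvTABLE : List Int := pvGEN.foldl (fun t g => t ++ t.map (fun x => PySem.Int.bxor x g)) [0]

-- GEN_TABLE[chk >> 25] is ported as pyGetD (the index is always 0..31, in range)
def pvStepB (chk v : Int) : Int :=
  PySem.Int.bxor (PySem.Int.bxor ((PySem.Int.band chk 0x1ffffff) <<< (5 : Nat)) v)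
    (PySem.List.pyGetD pvTABLE (chk >>> (25 : Nat)) 0)

def bech32_polymod_alt (values : List Int) : Int := values.foldl pvStepB 1

-- _ZMAP = {c: i for i, c in enumerate(ZBASE32)}
def pvZMAP : PySem.Dict Char Int :=
  (PySem.List.enumerate pvZB 0).foldl (fun d p => d.insert p.2 p.1) PySem.Dict.empty

-- B's 'for x in s[pos+1:]' loop: append _ZMAP.get(x), early return None on a miss
def pvScanData (acc : List Int) (cs : List Char) : Option (List Int) :=
  match cs with
  | [] => some acc
  | x :: rest =>
    match pvZMAP.get? x with
    | none => none
    | some v => pvScanData (acc ++ [v]) rest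

def bech32_decode_alt (s : String) : Option String × Option (List Int) :=
  let cs := s.toList
  if cs.any (fun x => decide (x.toNat < 31) || decide (127 < x.toNat)) then (none, none)
  else
    let pos := PySem.Str.rfind s "-"
    if pos < 1 ∨ pos + 7 > ((PySem.Str.len s : Int)) ∨ ((PySem.Str.len s : Int)) > 89 then (none, none)
    else
      match pvScanData [] (PySem.List.slice cs (some (pos + 1)) none) with
      | none => (none, none)
      | some data =>
        let hrp := PySem.List.slice cs none (some pos)
        if bech32_polymod_alt (bech32_hrp_expand hrp ++ data) ≠ 1 then (none, none)
        else (some (String.ofList hrp), some (PySem.List.slice data none (some (-6))))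

-- ===== PRECONDITION & SPEC =====
def Spec_bech32_decode (s : String) (out : Option String × Option (List Int)) : Prop := out = bech32_decode_alt s
instance (s : String) (out : Option String × Option (List Int)) : Decidable (Spec_bech32_decode s out) := by unfold Spec_bech32_decode; infer_instance

-- ===== CLAIM (what is proved, stated in full; the proofs are below) =====
def Claim_equal_bech32_decode : Prop := ∀ (s : String), Dom_bech32_decode s → Spec_bech32_decode s (bech32_decode s)

-- ===== LEMMAS AND PROOFS =====

-- Nat-level models of the two step functions (the loop state stays a nonnegative int < 2^30)
def pvGENN : List Nat := [0x3b6a57b2, 0x26508e6d, 0x1ea119fa, 0x3d4233dd, 0x2a1462b3]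
def pvTBLN : List Nat := pvGENN.foldl (fun t g => t ++ t.map (fun x => x ^^^ g)) [0]

def pvStepNA (m v : Nat) : Nat :=
  (List.range 5).foldl
    (fun c i => c ^^^ (if (m >>> 25 >>> i) &&& 1 ≠ 0 then pvGENN.getD i 0 else 0))
    (((m &&& 0x1ffffff) <<< 5) ^^^ v)

def pvStepNB (m v : Nat) : Nat :=
  (((m &&& 0x1ffffff) <<< 5) ^^^ v) ^^^ pvTBLN.getD (m >>> 25) 0

lemma foldl_xor_hoist (f : Nat → Nat) (l : List Nat) :
    ∀ c : Nat, l.foldl (fun c i => c ^^^ f i) c = c ^^^ l.foldl (fun c i => c ^^^ f i) 0 := by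
  induction l with
  | nil => intro c; simp
  | cons a t ih =>
    intro c
    simp only [List.foldl_cons]
    rw [ih (c ^^^ f a), ih (0 ^^^ f a)]
    simp [Nat.xor_assoc]

lemma tbl_spec : ∀ k < 32, pvTBLN.getD k 0 =
    (List.range 5).foldl (fun c i => c ^^^ (if (k >>> i) &&& 1 ≠ 0 then pvGENN.getD i 0 else 0)) 0 := by
  decide

lemma stepN_eq (m v : Nat) (hm : m < 2 ^ 30) : pvStepNA m v = pvStepNB m v := by
  have hk : m >>> 25 < 32 := by rw [Nat.shiftRight_eq_div_pow]; omega
  unfold pvStepNA pvStepNB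
  have := foldl_xor_hoist (fun i => if (m >>> 25 >>> i) &&& 1 ≠ 0 then pvGENN.getD i 0 else 0)
    (List.range 5) (((m &&& 0x1ffffff) <<< 5) ^^^ v)
  rw [this, tbl_spec (m >>> 25) hk]

lemma stepN_lt (m v : Nat) (hm : m < 2 ^ 30) (hv : v < 32) : pvStepNB m v < 2 ^ 30 := by
  unfold pvStepNB
  have hk : m >>> 25 < 32 := by rw [Nat.shiftRight_eq_div_pow]; omega
  have h1 : (m &&& 0x1ffffff) <<< 5 < 2 ^ 30 := by
    have := Nat.and_le_right (n := m) (m := 0x1ffffff)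
    rw [Nat.shiftLeft_eq]; omega
  have h2 : ((m &&& 0x1ffffff) <<< 5) ^^^ v < 2 ^ 30 :=
    Nat.xor_lt_two_pow h1 (by omega)
  have h3 : pvTBLN.getD (m >>> 25) 0 < 2 ^ 30 := by
    revert hk; generalize m >>> 25 = k; revert k; decide
  exact Nat.xor_lt_two_pow h2 h3

lemma cast_shiftR (m k : Nat) : ((m : Int) >>> k) = ((m >>> k : Nat) : Int) := rfl
lemma cast_shiftL (m k : Nat) : ((m : Int) <<< k) = ((m <<< k : Nat) : Int) := rfl

lemma band_lit (m : Nat) : PySem.Int.band (↑m) 0x1ffffff = ↑(m &&& 0x1ffffff) := by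
  have : (0x1ffffff : Int) = ((0x1ffffff : Nat) : Int) := rfl
  rw [this, PySem.Int.band_natCast]

lemma band1 (n : Nat) : PySem.Int.band (↑n) 1 = ↑(n &&& 1) := by
  have : (1 : Int) = ((1 : Nat) : Int) := rfl
  rw [this, PySem.Int.band_natCast]

lemma band31 (n : Nat) : PySem.Int.band (↑n) 31 = ↑(n &&& 31) := by
  have : (31 : Int) = ((31 : Nat) : Int) := rfl
  rw [this, PySem.Int.band_natCast]

lemma stepB_cast (m v : Nat) (hm : m < 2 ^ 30) :
    pvStepB (↑m) (↑v) = ↑(pvStepNB m v) := by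
  have hk : m >>> 25 < 32 := by rw [Nat.shiftRight_eq_div_pow]; omega
  have htb : PySem.List.pyGetD pvTABLE ((m >>> 25 : Nat) : Int) 0 = ((pvTBLN.getD (m >>> 25) 0 : Nat) : Int) := by
    revert hk; generalize m >>> 25 = k; revert k; decide
  unfold pvStepB pvStepNB
  rw [band_lit, cast_shiftL, PySem.Int.bxor_natCast, cast_shiftR, htb, PySem.Int.bxor_natCast]

lemma gen_lit : ∀ i : Nat, i < 5 →
    PySem.List.pyGetD pvGEN ((i : Nat) : Int) 0 = ((pvGENN.getD i 0 : Nat) : Int) := by decide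

lemma ite_cast (P : Prop) [Decidable P] (a : Nat) :
    (if P then ((a : Nat) : Int) else 0) = ↑(if P then a else (0 : Nat)) := by
  split <;> simp

lemma stepA_cast (m v : Nat) : pvStepA (↑m) (↑v) = ↑(pvStepNA m v) := by
  unfold pvStepA pvStepNA
  rw [band_lit, cast_shiftL, PySem.Int.bxor_natCast, cast_shiftR]
  have hr : PySem.List.pyRange 0 5 1 = [0, 1, 2, 3, 4] := by decide
  rw [hr]
  simp only [List.range_succ, List.range_zero, List.nil_append, List.cons_append, List.foldl_cons,
    List.foldl_nil]
  generalize ((m &&& 0x1ffffff) <<< 5) ^^^ v = c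
  have g0 := gen_lit 0 (by norm_num)
  have g1 := gen_lit 1 (by norm_num)
  have g2 := gen_lit 2 (by norm_num)
  have g3 := gen_lit 3 (by norm_num)
  have g4 := gen_lit 4 (by norm_num)
  norm_num at g0 g1 g2 g3 g4
  simp only [show ((0 : Int).toNat) = 0 from rfl, show ((1 : Int).toNat) = 1 from rfl,
    show ((2 : Int).toNat) = 2 from rfl, show ((3 : Int).toNat) = 3 from rfl,
    show ((4 : Int).toNat) = 4 from rfl]
  simp only [Int.shiftRight_natCast, band1, ne_eq, Int.natCast_eq_zero, g0, g1, g2, g3, g4,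
    ite_cast, PySem.Int.bxor_natCast, Nat.cast_inj]
  simp

lemma fold_agree : ∀ (values : List Int) (m : Nat), m < 2 ^ 30 →
    (∀ v ∈ values, ∃ n : Nat, v = ↑n ∧ n < 32) →
    values.foldl pvStepA ↑m = values.foldl pvStepB ↑m := by
  intro values
  induction values with
  | nil => intro m _ _; rfl
  | cons v vs ih =>
    intro m hm hv
    obtain ⟨n, rfl, hn⟩ := hv v (by simp)
    simp only [List.foldl_cons]
    rw [stepA_cast m n, stepN_eq m n hm, ← stepB_cast m n hm]
    have h2 : pvStepB ↑m ↑n = ((pvStepNB m n : Nat) : Int) := stepB_cast m n hm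
    rw [h2]
    exact ih (pvStepNB m n) (stepN_lt m n hm hn) (fun v hv' => hv v (by simp [hv']))

lemma polymod_eq (values : List Int) (hv : ∀ v ∈ values, ∃ n : Nat, v = ↑n ∧ n < 32) :
    bech32_polymod values = bech32_polymod_alt values := by
  unfold bech32_polymod bech32_polymod_alt
  have h1 : (1 : Int) = ((1 : Nat) : Int) := rfl
  rw [h1]
  exact fold_agree values 1 (by norm_num) hv

set_option maxRecDepth 6000 in
lemma zmap_mem : ∀ x ∈ pvZB, pvZMAP.get? x = some (PySem.Chars.find pvZB [x]) := by
  intro x hx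
  fin_cases hx <;> decide

set_option maxRecDepth 6000 in
lemma zmap_keys : pvZMAP.keys = pvZB := by decide

lemma zmap_not_mem (x : Char) (h : x ∉ pvZB) : pvZMAP.get? x = none := by
  rw [PySem.Dict.get?_eq_none_iff_not_mem_keys, zmap_keys]
  exact h

lemma isIn_single (x : Char) : PySem.Chars.isIn [x] pvZB = decide (x ∈ pvZB) := by
  by_cases h : x ∈ pvZB
  · simp only [h, decide_true]
    exact (PySem.Chars.isIn_iff_infix _ _).mpr ((List.singleton_infix_iff _ _).mpr h)
  · simp only [h, decide_false]
    rw [Bool.eq_false_iff]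
    intro hc
    exact h ((List.singleton_infix_iff _ _).mp ((PySem.Chars.isIn_iff_infix _ _).mp hc))

lemma scan_eq : ∀ (cs : List Char) (acc : List Int),
    pvScanData acc cs =
      if cs.all (fun x => PySem.Chars.isIn [x] pvZB) then
        some (acc ++ cs.map (fun x => PySem.Chars.find pvZB [x]))
      else none := by
  intro cs
  induction cs with
  | nil => intro acc; simp [pvScanData]
  | cons x rest ih =>
    intro acc
    simp only [pvScanData, List.all_cons, isIn_single]
    by_cases h : x ∈ pvZB
    · rw [zmap_mem x h]
      show pvScanData (acc ++ [PySem.Chars.find pvZB [x]]) rest = _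
      rw [ih]
      simp only [List.map_cons]
      refine if_congr ?_ (by simp) rfl
      simp [isIn_single, h]
    · rw [zmap_not_mem x h]
      simp [h]

set_option maxRecDepth 6000 in
lemma find_bound : ∀ x ∈ pvZB, ∃ n : Nat, PySem.Chars.find pvZB [x] = ↑n ∧ n < 32 := by
  have h : ∀ x ∈ pvZB, 0 ≤ PySem.Chars.find pvZB [x] ∧ PySem.Chars.find pvZB [x] < 32 := by
    intro x hx
    fin_cases hx <;> decide
  intro x hx
  obtain ⟨h0, h32⟩ := h x hx
  exact ⟨(PySem.Chars.find pvZB [x]).toNat, by omega, by omega⟩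

lemma hrp_values (cs : List Char) (h : ∀ x ∈ cs, 31 ≤ x.toNat ∧ x.toNat ≤ 127) :
    ∀ v ∈ bech32_hrp_expand cs, ∃ n : Nat, v = ↑n ∧ n < 32 := by
  intro v hv
  unfold bech32_hrp_expand at hv
  simp only [List.mem_append, List.mem_map, List.mem_singleton] at hv
  rcases hv with ((⟨x, hx, rfl⟩ | rfl) | ⟨x, hx, rfl⟩) | rfl
  · refine ⟨x.toNat >>> 5, cast_shiftR _ _, ?_⟩
    have := (h x hx).2
    rw [Nat.shiftRight_eq_div_pow]
    omega
  · exact ⟨0, rfl, by norm_num⟩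
  · refine ⟨x.toNat &&& 31, band31 _, ?_⟩
    have := Nat.and_le_right (n := x.toNat) (m := 31)
    omega
  · exact ⟨0, rfl, by norm_num⟩

-- ===== VERDICT (by name: the statement is the Claim_ definition above) =====
theorem bech32_decode_spec : Claim_equal_bech32_decode := by
  intro s _
  show bech32_decode s = bech32_decode_alt s
  unfold bech32_decode bech32_decode_alt
  by_cases h1 : (s.toList.any (fun x => decide (x.toNat < 31) || decide (127 < x.toNat))) = true
  · rw [if_pos h1, if_pos h1]
  · rw [if_neg h1, if_neg h1]
    by_cases h2 : (PySem.Str.rfind s "-" < 1 ∨ PySem.Str.rfind s "-" + 7 > ((PySem.Str.len s : Int)) ∨ ((PySem.Str.len s : Int)) > 89)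
    · rw [if_pos h2, if_pos h2]
    · rw [if_neg h2, if_neg h2]
      rw [scan_eq]
      set tl := PySem.List.slice s.toList (some (PySem.Str.rfind s "-" + 1)) none with htl
      by_cases hall : (tl.all (fun x => PySem.Chars.isIn [x] pvZB)) = true
      · rw [if_neg (not_not_intro hall), if_pos hall]
        show _ = (match some ([] ++ tl.map (fun x => PySem.Chars.find pvZB [x])) with
          | none => ((none, none) : Option String × Option (List Int))
          | some data =>
            if bech32_polymod_alt (bech32_hrp_expand (PySem.List.slice s.toList none (some (PySem.Str.rfind s "-"))) ++ data) ≠ 1 then (none, none)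
            else (some (String.ofList (PySem.List.slice s.toList none (some (PySem.Str.rfind s "-")))), some (PySem.List.slice data none (some (-6)))))
        simp only [List.nil_append]
        set hrp := PySem.List.slice s.toList none (some (PySem.Str.rfind s "-")) with hhrp
        set data := tl.map (fun x => PySem.Chars.find pvZB [x]) with hdata
        have hchars : ∀ x ∈ s.toList, 31 ≤ x.toNat ∧ x.toNat ≤ 127 := by
          intro x hx
          by_contra hcon
          apply h1
          rw [List.any_eq_true]
          refine ⟨x, hx, ?_⟩
          simp only [Bool.or_eq_true, decide_eq_true_iff]
          omega
        have hbound : ∀ v ∈ bech32_hrp_expand hrp ++ data, ∃ n : Nat, v = ↑n ∧ n < 32 := by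
          intro v hv
          rw [List.mem_append] at hv
          rcases hv with hv | hv
          · exact hrp_values hrp (fun x hx => hchars x (PySem.List.mem_of_mem_slice _ _ _ hx)) v hv
          · rw [hdata, List.mem_map] at hv
            obtain ⟨x, hx, rfl⟩ := hv
            have hxz : x ∈ pvZB := by
              rw [List.all_eq_true] at hall
              have := hall x hx
              rw [isIn_single, decide_eq_true_iff] at this
              exact this
            exact find_bound x hxz
        have hpoly := polymod_eq (bech32_hrp_expand hrp ++ data) hbound
        unfold bech32_verify_checksum
        rw [hpoly]
        by_cases hc : bech32_polymod_alt (bech32_hrp_expand hrp ++ data) = 1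
        · rw [if_neg (by simp [hc]), if_neg (by simp [hc])]
        · rw [if_pos (by simp [hc]), if_pos (by simp [hc])]
      · rw [if_pos (by simpa using hall), if_neg hall]
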